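-- pv_equiv track=rewrite | github.com/jpamies/wc-fantasy-draft | src/backend/services/bot_service.py | _snap_to_preset
-- ===== SOURCE A (Python) =====
-- _CLAUSE_PRESETS = [0, 1_000_000, 5_000_000, 15_000_000, 25_000_000, 50_000_000, 80_000_000]
--
-- def _snap_to_preset(value: int) -> int:
--     """Return the largest preset <= value (min 0)."""
--     chosen = 0
--     for p in _CLAUSE_PRESETS:
--         if p <= value:
--             chosen = p
--         else:
--             break
--     return chosen
-- ===== SOURCE B (Python) =====
-- import bisect
--
-- _CLAUSE_PRESETS = [0, 1_000_000, 5_000_000, 15_000_000, 25_000_000, 50_000_000, 80_000_000]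
--
-- def _snap_to_preset(value: int) -> int:
--     """Return the largest preset <= value (min 0)."""
--     idx = bisect.bisect_right(_CLAUSE_PRESETS, value) - 1
--     return _CLAUSE_PRESETS[idx] if idx >= 0 else 0
-- ===== Notes on version B (the rewrite author's own statement) =====
-- stated objective: idiomatic
-- what changed: Replaced the linear accumulate-with-break scan over the preset table by a bisect_right binary search with a clamped index.
import Mathlib
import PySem

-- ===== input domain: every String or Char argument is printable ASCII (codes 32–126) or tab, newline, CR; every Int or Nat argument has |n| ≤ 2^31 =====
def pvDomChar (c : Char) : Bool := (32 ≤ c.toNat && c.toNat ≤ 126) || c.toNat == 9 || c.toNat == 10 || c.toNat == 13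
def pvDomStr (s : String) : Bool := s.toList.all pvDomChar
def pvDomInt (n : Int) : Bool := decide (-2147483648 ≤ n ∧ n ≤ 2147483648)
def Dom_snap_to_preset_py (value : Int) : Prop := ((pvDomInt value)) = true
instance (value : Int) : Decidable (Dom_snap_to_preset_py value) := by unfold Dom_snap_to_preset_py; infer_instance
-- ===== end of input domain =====

-- B replaces A's linear accumulate-with-break scan over the preset table by a
-- bisect_right binary search with the negative index clamped to return 0 (idiomatic).

-- ===== PORT A =====
def pvClausePresets : List Int :=
  [0, 1000000, 5000000, 15000000, 25000000, 50000000, 80000000]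

-- the for-loop with break, state `chosen`
def pvSnapLoop : List Int → Int → Int → Int
  | [], _, chosen => chosen
  | p :: rest, value, chosen =>
      if p ≤ value then pvSnapLoop rest value p else chosen

def snap_to_preset_py (value : Int) : Int :=
  pvSnapLoop pvClausePresets value 0

-- ===== PORT B =====
-- bisect.bisect_right's while-loop: lo/hi bounds, halving each step
def pvBisectRight (a : List Int) (value : Int) (lo hi : Nat) : Nat :=
  if lo < hi then
    let mid := (lo + hi) / 2
    if value < a.getD mid 0 then pvBisectRight a value lo mid
    else pvBisectRight a value (mid + 1) hi
  else lo
termination_by hi - lo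
decreasing_by all_goals omega

def snap_to_preset_py_alt (value : Int) : Int :=
  let idx := pvBisectRight pvClausePresets value 0 pvClausePresets.length
  -- Python: idx = bisect_right(...) - 1; return presets[idx] if idx >= 0 else 0
  if idx = 0 then 0 else pvClausePresets.getD (idx - 1) 0

-- ===== PRECONDITION & SPEC =====
def Spec_snap_to_preset_py (value : Int) (out : Int) : Prop := out = snap_to_preset_py_alt value
instance (value : Int) (out : Int) : Decidable (Spec_snap_to_preset_py value out) := by unfold Spec_snap_to_preset_py; infer_instance

-- ===== CLAIM (what is proved, stated in full; the proofs are below) =====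
def Claim_equal_snap_to_preset_py : Prop := ∀ (value : Int), Dom_snap_to_preset_py value → Spec_snap_to_preset_py value (snap_to_preset_py value)

-- ===== LEMMAS AND PROOFS =====

-- ===== VERDICT (by name: the statement is the Claim_ definition above) =====
theorem snap_to_preset_py_spec : Claim_equal_snap_to_preset_py := by
  intro value _
  unfold Spec_snap_to_preset_py snap_to_preset_py snap_to_preset_py_alt
  simp [pvClausePresets, pvSnapLoop, pvBisectRight, List.getD]
  split_ifs <;> first | omega | (norm_num; omega) | norm_num
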